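-- pv_equiv track=rewrite | github.com/GabrielReira/Python-Exercises | 62 - Valores para hipotenusa.py | hipotenusas
-- ===== SOURCE A (Python) =====
-- def é_hipotenusa(a, b ,c):
--     if (c**2 == a**2 + b**2):
--         return True
--     else:
--         return False
--
-- def hipotenusas(n):
--     valores = list()
--
--     a, b, c = 1, 1, 1
--
--     while a < n:
--         while b < n:
--             while c <= n:
--                 if é_hipotenusa(a, b, c) and (c not in valores):
--                     valores.append(c)
--                 c += 1
--             b += 1
--             c = 1
--         a += 1
--         b = 1
--
--     return sorted(valores)
-- ===== SOURCE B (Python) =====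
-- def _encontra(c, lo, hi):
--     # two-pointer scan: is there lo <= a <= b <= hi with a*a + b*b == c*c ?
--     while lo <= hi:
--         s = lo * lo + hi * hi
--         if s == c * c:
--             return True
--         if s < c * c:
--             lo += 1
--         else:
--             hi -= 1
--     return False
--
-- def hipotenusas(n):
--     res = []
--     for c in range(1, n + 1):
--         if _encontra(c, 1, min(c - 1, n - 1)):
--             res.append(c)
--     return res
-- ===== Notes on version B (the rewrite author's own statement) =====
-- stated objective: faster
-- what changed: Replaces A's triple nested loop with dedup-by-membership plus a final sort by a single increasing pass over c, each c tested with an O(n) two-pointer search for legs a<=b, so no dedup and no sort are needed.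
import Mathlib
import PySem

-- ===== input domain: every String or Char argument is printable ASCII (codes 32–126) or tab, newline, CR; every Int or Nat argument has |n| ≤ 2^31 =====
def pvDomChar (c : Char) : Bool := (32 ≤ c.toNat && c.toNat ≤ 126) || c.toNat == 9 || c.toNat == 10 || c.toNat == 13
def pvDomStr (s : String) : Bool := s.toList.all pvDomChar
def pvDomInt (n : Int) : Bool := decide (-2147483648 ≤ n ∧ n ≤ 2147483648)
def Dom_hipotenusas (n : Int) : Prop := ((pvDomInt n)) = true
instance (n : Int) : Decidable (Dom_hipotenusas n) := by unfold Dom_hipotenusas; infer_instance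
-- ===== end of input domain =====

-- B replaces A's triple nested loop (O(n^3), dedup by list membership, final sort)
-- with one increasing pass over c using an O(n) two-pointer search for legs a<=b (O(n^2), asymptotically faster).

-- ===== PORT A =====
def eHipotenusa (a b c : Int) : Bool :=
  if c ^ 2 = a ^ 2 + b ^ 2 then true else false

-- innermost 'while c <= n' loop of A
def loopC (n a b c : Int) (vals : List Int) : List Int :=
  if _h : c ≤ n then
    loopC n a b (c + 1)
      (if eHipotenusa a b c = true ∧ c ∉ vals then vals ++ [c] else vals)
  else vals
termination_by (n + 1 - c).toNat
decreasing_by omega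

-- middle 'while b < n' loop of A; returns (valores, final value of the mutable c)
def loopB (n a b c : Int) (vals : List Int) : List Int × Int :=
  if _h : b < n then loopB n a (b + 1) 1 (loopC n a b c vals)
  else (vals, c)
termination_by (n - b).toNat
decreasing_by omega

-- outer 'while a < n' loop of A
def loopA (n a b c : Int) (vals : List Int) : List Int :=
  if _h : a < n then
    loopA n (a + 1) 1 (loopB n a b c vals).2 (loopB n a b c vals).1
  else vals
termination_by (n - a).toNat
decreasing_by omega

def hipotenusas (n : Int) : List Int :=
  PySem.List.sorted (loopA n 1 1 1 []) (fun x => x) false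

-- ===== PORT B =====
-- two-pointer scan of Source B's helper _encontra
def encontra (c lo hi : Int) : Bool :=
  if _h : lo ≤ hi then
    if lo * lo + hi * hi = c * c then true
    else if lo * lo + hi * hi < c * c then encontra c (lo + 1) hi
    else encontra c lo (hi - 1)
  else false
termination_by (hi + 1 - lo).toNat
decreasing_by all_goals omega

def hipotenusas_alt (n : Int) : List Int :=
  (PySem.List.pyRange 1 (n + 1) 1).foldl
    (fun res c => if encontra c 1 (min (c - 1) (n - 1)) then res ++ [c] else res) []

-- ===== PRECONDITION & SPEC =====
def Spec_hipotenusas (n : Int) (out : List Int) : Prop := out = hipotenusas_alt n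
instance (n : Int) (out : List Int) : Decidable (Spec_hipotenusas n out) := by unfold Spec_hipotenusas; infer_instance

-- ===== CLAIM (what is proved, stated in full; the proofs are below) =====
def Claim_equal_hipotenusas : Prop := ∀ (n : Int), Dom_hipotenusas n → Spec_hipotenusas n (hipotenusas n)

-- ===== LEMMAS AND PROOFS =====

-- c is a hypotenuse with both legs in [1, n)
def IsHyp (n c : Int) : Prop :=
  ∃ a b : Int, 1 ≤ a ∧ a < n ∧ 1 ≤ b ∧ b < n ∧ c * c = a * a + b * b

theorem encontra_iff (c lo hi : Int) (hlo : 1 ≤ lo) :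
    encontra c lo hi = true ↔
      ∃ a b : Int, lo ≤ a ∧ a ≤ b ∧ b ≤ hi ∧ a * a + b * b = c * c := by
  induction lo, hi using encontra.induct c with
  | case1 lo hi h heq =>
    rw [encontra, dif_pos h, if_pos heq]
    simp only [true_iff]
    exact ⟨lo, hi, le_refl _, h, le_refl _, heq⟩
  | case2 lo hi h hne hlt ih =>
    rw [encontra, dif_pos h, if_neg hne, if_pos hlt]
    rw [ih (by omega)]
    constructor
    · rintro ⟨a, b, h1, h2, h3, h4⟩; exact ⟨a, b, by omega, h2, h3, h4⟩
    · rintro ⟨a, b, h1, h2, h3, h4⟩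
      refine ⟨a, b, ?_, h2, h3, h4⟩
      rcases eq_or_lt_of_le h1 with he | hl
      · exfalso; nlinarith
      · omega
  | case3 lo hi h hne hge ih =>
    rw [encontra, dif_pos h, if_neg hne, if_neg hge]
    rw [ih hlo]
    constructor
    · rintro ⟨a, b, h1, h2, h3, h4⟩; exact ⟨a, b, h1, h2, by omega, h4⟩
    · rintro ⟨a, b, h1, h2, h3, h4⟩
      refine ⟨a, b, h1, h2, ?_, h4⟩
      rcases eq_or_lt_of_le h3 with he | hl
      · exfalso; subst he
        have hla : lo * lo ≤ a * a := mul_le_mul h1 h1 (by omega) (by omega)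
        omega
      · omega
  | case4 lo hi h =>
    rw [encontra, dif_neg h]
    simp only [Bool.false_eq_true, false_iff]
    rintro ⟨a, b, h1, h2, h3, _⟩; omega

theorem encontra_main (n c : Int) (hc : 1 ≤ c) :
    encontra c 1 (min (c - 1) (n - 1)) = true ↔ IsHyp n c := by
  rw [encontra_iff c 1 _ le_rfl]
  constructor
  · rintro ⟨a, b, h1, h2, h3, h4⟩
    exact ⟨a, b, h1, by omega, by omega, by omega, h4.symm⟩
  · rintro ⟨a, b, h1, h2, h3, h4, h5⟩
    rcases le_total a b with hab | hab
    · refine ⟨a, b, h1, hab, ?_, h5.symm⟩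
      have : b < c := by nlinarith
      omega
    · refine ⟨b, a, h3, hab, ?_, by linarith [h5]⟩
      have : a < c := by nlinarith
      omega


theorem mem_loopC (n a b c x : Int) (vals : List Int) :
    x ∈ loopC n a b c vals ↔
      x ∈ vals ∨ (c ≤ x ∧ x ≤ n ∧ x ^ 2 = a ^ 2 + b ^ 2) := by
  induction c, vals using loopC.induct n a b with
  | case1 c vals h ih =>
    simp only [dite_eq_ite] at ih
    rw [loopC, dif_pos h, ih]
    by_cases hx : c ^ 2 = a ^ 2 + b ^ 2
    · by_cases hm : c ∈ vals
      · rw [if_neg (by simp [hm])]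
        constructor
        · rintro (hv | ⟨h1, h2, h3⟩)
          · exact Or.inl hv
          · exact Or.inr ⟨by omega, h2, h3⟩
        · rintro (hv | ⟨h1, h2, h3⟩)
          · exact Or.inl hv
          · rcases eq_or_lt_of_le h1 with he | hl
            · exact Or.inl (he ▸ hm)
            · exact Or.inr ⟨by omega, h2, h3⟩
      · rw [if_pos ⟨by simp [eHipotenusa, hx], hm⟩]
        simp only [List.mem_append, List.mem_singleton]
        constructor
        · rintro ((hv | he) | ⟨h1, h2, h3⟩)
          · exact Or.inl hv
          · exact Or.inr ⟨le_of_eq he.symm, by omega, he ▸ hx⟩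
          · exact Or.inr ⟨by omega, h2, h3⟩
        · rintro (hv | ⟨h1, h2, h3⟩)
          · exact Or.inl (Or.inl hv)
          · rcases eq_or_lt_of_le h1 with he | hl
            · exact Or.inl (Or.inr he.symm)
            · exact Or.inr ⟨by omega, h2, h3⟩
    · rw [if_neg (by simp [eHipotenusa, hx])]
      constructor
      · rintro (hv | ⟨h1, h2, h3⟩)
        · exact Or.inl hv
        · exact Or.inr ⟨by omega, h2, h3⟩
      · rintro (hv | ⟨h1, h2, h3⟩)
        · exact Or.inl hv
        · rcases eq_or_lt_of_le h1 with he | hl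
          · exact absurd (he ▸ h3) hx
          · exact Or.inr ⟨by omega, h2, h3⟩
  | case2 c vals h =>
    rw [loopC, dif_neg h]
    constructor
    · exact Or.inl
    · rintro (hv | ⟨h1, h2, _⟩)
      · exact hv
      · omega

theorem nodup_loopC (n a b c : Int) (vals : List Int) (h : vals.Nodup) :
    (loopC n a b c vals).Nodup := by
  induction c, vals using loopC.induct n a b with
  | case1 c vals hc ih =>
    rw [loopC, dif_pos hc]
    apply ih
    split_ifs with hcond
    · simp only [List.nodup_append, List.nodup_singleton, List.mem_singleton, true_and]
      exact ⟨h, fun y hy b hb he => hcond.2 ((he.trans hb) ▸ hy)⟩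
    · exact h
  | case2 c vals hc => rw [loopC, dif_neg hc]; exact h

theorem loopB_snd (n a b c : Int) (vals : List Int) (h : b < n) :
    (loopB n a b c vals).2 = 1 := by
  induction b, c, vals using loopB.induct n a with
  | case1 b c vals hb ih =>
    rw [loopB, dif_pos hb]
    by_cases h2 : b + 1 < n
    · exact ih h2
    · rw [loopB, dif_neg h2]
  | case2 b c vals hb => exact absurd h hb

theorem mem_loopB (n a b c x : Int) (vals : List Int) (hc : c = 1) :
    x ∈ (loopB n a b c vals).1 ↔
      x ∈ vals ∨ ∃ b' : Int, b ≤ b' ∧ b' < n ∧ 1 ≤ x ∧ x ≤ n ∧ x ^ 2 = a ^ 2 + b' ^ 2 := by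
  induction b, c, vals using loopB.induct n a with
  | case1 b c vals hb ih =>
    subst hc
    rw [loopB, dif_pos hb, ih rfl, mem_loopC]
    constructor
    · rintro ((hv | ⟨h1, h2, h3⟩) | ⟨b', hb1, hb2, hx⟩)
      · exact Or.inl hv
      · exact Or.inr ⟨b, le_rfl, hb, h1, h2, h3⟩
      · exact Or.inr ⟨b', by omega, hb2, hx⟩
    · rintro (hv | ⟨b', hb1, hb2, h1, h2, h3⟩)
      · exact Or.inl (Or.inl hv)
      · rcases eq_or_lt_of_le hb1 with he | hl
        · exact Or.inl (Or.inr ⟨h1, h2, he ▸ h3⟩)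
        · exact Or.inr ⟨b', by omega, hb2, h1, h2, h3⟩
  | case2 b c vals hb =>
    rw [loopB, dif_neg hb]
    constructor
    · exact Or.inl
    · rintro (hv | ⟨b', hb1, hb2, _⟩)
      · exact hv
      · omega

theorem nodup_loopB (n a b c : Int) (vals : List Int) (h : vals.Nodup) :
    (loopB n a b c vals).1.Nodup := by
  induction b, c, vals using loopB.induct n a with
  | case1 b c vals hb ih =>
    rw [loopB, dif_pos hb]
    exact ih (nodup_loopC n a b c vals h)
  | case2 b c vals hb => rw [loopB, dif_neg hb]; exact h

theorem mem_loopA (n a b c x : Int) (vals : List Int) (ha : 1 ≤ a) (hb : b = 1) (hc : c = 1) :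
    x ∈ loopA n a b c vals ↔
      x ∈ vals ∨ ∃ a' : Int, a ≤ a' ∧ a' < n ∧
        ∃ b' : Int, 1 ≤ b' ∧ b' < n ∧ 1 ≤ x ∧ x ≤ n ∧ x ^ 2 = a' ^ 2 + b' ^ 2 := by
  induction a, b, c, vals using loopA.induct n with
  | case1 a b c vals hlt ih =>
    subst hb; subst hc
    have hsnd : (loopB n a 1 1 vals).2 = 1 := loopB_snd n a 1 1 vals (by omega)
    rw [loopA, dif_pos hlt, ih (by omega) rfl hsnd, mem_loopB n a 1 1 x vals rfl]
    constructor
    · rintro ((hv | ⟨b', h1, h2, h3, h4, h5⟩) | ⟨a', ha1, ha2, hrest⟩)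
      · exact Or.inl hv
      · exact Or.inr ⟨a, le_rfl, hlt, b', h1, h2, h3, h4, h5⟩
      · exact Or.inr ⟨a', by omega, ha2, hrest⟩
    · rintro (hv | ⟨a', ha1, ha2, b', hrest⟩)
      · exact Or.inl (Or.inl hv)
      · rcases eq_or_lt_of_le ha1 with he | hl
        · exact Or.inl (Or.inr ⟨b', he ▸ hrest⟩)
        · exact Or.inr ⟨a', by omega, ha2, b', hrest⟩
  | case2 a b c vals hlt =>
    rw [loopA, dif_neg hlt]
    constructor
    · exact Or.inl
    · rintro (hv | ⟨a', ha1, ha2, _⟩)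
      · exact hv
      · omega

theorem nodup_loopA (n a b c : Int) (vals : List Int) (h : vals.Nodup) :
    (loopA n a b c vals).Nodup := by
  induction a, b, c, vals using loopA.induct n with
  | case1 a b c vals hlt ih =>
    rw [loopA, dif_pos hlt]
    exact ih (nodup_loopB n a b c vals h)
  | case2 a b c vals hlt => rw [loopA, dif_neg hlt]; exact h

theorem mem_valores (n x : Int) :
    x ∈ loopA n 1 1 1 ([] : List Int) ↔ (1 ≤ x ∧ x ≤ n ∧ IsHyp n x) := by
  rw [mem_loopA n 1 1 1 x [] le_rfl rfl rfl]
  simp only [List.not_mem_nil, false_or]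
  constructor
  · rintro ⟨a', h1, h2, b', h3, h4, h5, h6, h7⟩
    rw [pow_two, pow_two, pow_two] at h7
    exact ⟨h5, h6, a', b', h1, h2, h3, h4, h7⟩
  · rintro ⟨h5, h6, a', b', h1, h2, h3, h4, h7⟩
    rw [← pow_two, ← pow_two, ← pow_two] at h7
    exact ⟨a', h1, h2, b', h3, h4, h5, h6, h7⟩

theorem alt_eq_filter (n : Int) :
    hipotenusas_alt n =
      (PySem.List.pyRange 1 (n + 1) 1).filter (fun c => encontra c 1 (min (c - 1) (n - 1))) := by
  rw [hipotenusas_alt, PySem.List.foldl_append_if_eq_filter]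
  simp

-- ===== VERDICT (by name: the statement is the Claim_ definition above) =====
theorem hipotenusas_spec : Claim_equal_hipotenusas := by
  intro n _
  unfold Spec_hipotenusas hipotenusas
  rw [alt_eq_filter]
  have hnd : ((PySem.List.pyRange 1 (n + 1) 1).filter
      (fun c => encontra c 1 (min (c - 1) (n - 1)))).Nodup :=
    (PySem.List.nodup_pyRange_one 1 (n + 1)).filter _
  have hperm : ((PySem.List.pyRange 1 (n + 1) 1).filter
      (fun c => encontra c 1 (min (c - 1) (n - 1)))).Perm (loopA n 1 1 1 []) := by
    rw [List.perm_ext_iff_of_nodup hnd (nodup_loopA n 1 1 1 [] List.nodup_nil)]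
    intro x
    rw [List.mem_filter, PySem.List.mem_pyRange_one, mem_valores]
    constructor
    · rintro ⟨⟨h1, h2⟩, he⟩
      exact ⟨h1, by omega, (encontra_main n x h1).mp he⟩
    · rintro ⟨h1, h2, hh⟩
      exact ⟨⟨h1, by omega⟩, (encontra_main n x h1).mpr hh⟩
  exact PySem.List.sorted_eq_of_perm_of_pairwise_lt _ _ _ hperm
    ((PySem.List.pairwise_lt_pyRange_one 1 (n + 1)).filter _)
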